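-- pv_equiv track=rewrite | github.com/TomaszWojtyniak/OpenScienceSearchEngine | src/Plot.py | getCategoriesNames
-- ===== SOURCE A (Python) =====
-- def getCategoriesNames(pdfs):
--     publikacje = []
--     for i in range(1, pdfs):  # 122
--         if i <= 10:
--             publikacje.append("architektura")
--         if i > 10 and i <= 20:
--             publikacje.append("ekonomia")
--         if i > 20 and i <= 30:
--             publikacje.append("matematyka")
--         if i > 30 and i <= 40:
--             publikacje.append("biologia")
--         if i > 40 and i <= 60:
--             publikacje.append("muzyka")
--         if i > 60 and i <= 70:
--             publikacje.append("architektura")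
--         if i > 70 and i <= 80:
--             publikacje.append("ekonomia")
--         if i > 80 and i <= 90:
--             publikacje.append("biologia")
--         if i > 90 and i <= 110:
--             publikacje.append("chemia")
--         if i > 110:
--             publikacje.append("fizyka")
--     return publikacje
-- ===== SOURCE B (Python) =====
-- def getCategoriesNames(pdfs):
--     n = len(range(1, pdfs))  # = max(0, pdfs - 1); raises TypeError for non-int pdfs, like A's range
--     segments = [("architektura", 10), ("ekonomia", 10), ("matematyka", 10),
--                 ("biologia", 10), ("muzyka", 20), ("architektura", 10),
--                 ("ekonomia", 10), ("biologia", 10), ("chemia", 20)]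
--     out = []
--     for name, count in segments:
--         out.extend([name] * count)
--     if n > 110:
--         out.extend(["fizyka"] * (n - 110))
--     return out[:n]
-- ===== Notes on version B (the rewrite author's own statement) =====
-- stated objective: simpler
-- what changed: Replaces the per-index loop with ten sequential range checks by a table-driven construction: a segment table of (name, run length) pairs expanded once, padded with 'fizyka' for the remaining slots, and truncated to pdfs-1 elements.
import Mathlib
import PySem

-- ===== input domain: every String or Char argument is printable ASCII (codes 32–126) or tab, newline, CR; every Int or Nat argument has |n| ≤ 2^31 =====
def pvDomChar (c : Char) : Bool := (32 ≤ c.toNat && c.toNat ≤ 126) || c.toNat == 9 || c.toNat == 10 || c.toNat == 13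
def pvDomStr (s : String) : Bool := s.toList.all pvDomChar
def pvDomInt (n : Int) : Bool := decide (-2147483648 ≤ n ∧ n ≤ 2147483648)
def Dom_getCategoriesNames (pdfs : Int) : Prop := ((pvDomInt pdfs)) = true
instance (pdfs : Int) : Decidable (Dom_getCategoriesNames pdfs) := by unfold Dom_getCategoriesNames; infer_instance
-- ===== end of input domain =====

-- B replaces A's ten per-index range checks by a table-driven construction (segment table expanded once,
-- then padded and truncated); objective: simpler. Equivalence of return values is proved on all of Dom.

-- ===== PORT A =====
-- the body of A's for-loop: ten independent ifs, each appending one name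
def getCategoriesNamesBody (publikacje : List String) (i : Int) : List String :=
  let publikacje := if i ≤ 10 then publikacje ++ ["architektura"] else publikacje
  let publikacje := if 10 < i ∧ i ≤ 20 then publikacje ++ ["ekonomia"] else publikacje
  let publikacje := if 20 < i ∧ i ≤ 30 then publikacje ++ ["matematyka"] else publikacje
  let publikacje := if 30 < i ∧ i ≤ 40 then publikacje ++ ["biologia"] else publikacje
  let publikacje := if 40 < i ∧ i ≤ 60 then publikacje ++ ["muzyka"] else publikacje
  let publikacje := if 60 < i ∧ i ≤ 70 then publikacje ++ ["architektura"] else publikacje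
  let publikacje := if 70 < i ∧ i ≤ 80 then publikacje ++ ["ekonomia"] else publikacje
  let publikacje := if 80 < i ∧ i ≤ 90 then publikacje ++ ["biologia"] else publikacje
  let publikacje := if 90 < i ∧ i ≤ 110 then publikacje ++ ["chemia"] else publikacje
  let publikacje := if 110 < i then publikacje ++ ["fizyka"] else publikacje
  publikacje

def getCategoriesNames (pdfs : Int) : List String :=
  (PySem.List.pyRange 1 pdfs 1).foldl getCategoriesNamesBody []

-- ===== PORT B =====
def getCategoriesNamesSegments : List (String × Int) :=
  [("architektura", 10), ("ekonomia", 10), ("matematyka", 10),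
   ("biologia", 10), ("muzyka", 20), ("architektura", 10),
   ("ekonomia", 10), ("biologia", 10), ("chemia", 20)]

def getCategoriesNames_alt (pdfs : Int) : List String :=
  let n : Int := max 0 (pdfs - 1)    -- len(range(1, pdfs))
  let out := getCategoriesNamesSegments.foldl
    (fun acc p => acc ++ List.replicate p.2.toNat p.1) []
  let out := if n > 110 then out ++ List.replicate (n - 110).toNat "fizyka" else out
  out.take n.toNat

-- ===== PRECONDITION & SPEC =====
def Spec_getCategoriesNames (pdfs : Int) (out : List String) : Prop := out = getCategoriesNames_alt pdfs
instance (pdfs : Int) (out : List String) : Decidable (Spec_getCategoriesNames pdfs out) := by unfold Spec_getCategoriesNames; infer_instance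

-- ===== CLAIM (what is proved, stated in full; the proofs are below) =====
def Claim_equal_getCategoriesNames : Prop := ∀ (pdfs : Int), Dom_getCategoriesNames pdfs → Spec_getCategoriesNames pdfs (getCategoriesNames pdfs)

-- ===== LEMMAS AND PROOFS =====

-- what A's loop body appends for a given i, written as one exclusive if-chain
def catStep (i : Int) : List String :=
  if i ≤ 10 then ["architektura"]
  else if 10 < i ∧ i ≤ 20 then ["ekonomia"]
  else if 20 < i ∧ i ≤ 30 then ["matematyka"]
  else if 30 < i ∧ i ≤ 40 then ["biologia"]
  else if 40 < i ∧ i ≤ 60 then ["muzyka"]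
  else if 60 < i ∧ i ≤ 70 then ["architektura"]
  else if 70 < i ∧ i ≤ 80 then ["ekonomia"]
  else if 80 < i ∧ i ≤ 90 then ["biologia"]
  else if 90 < i ∧ i ≤ 110 then ["chemia"]
  else if 110 < i then ["fizyka"]
  else []

-- B's expanded segment table, as a plain value
def catBase : List String :=
  getCategoriesNamesSegments.foldl (fun acc p => acc ++ List.replicate p.2.toNat p.1) []

lemma catBase_length : catBase.length = 110 := by decide

set_option maxHeartbeats 1600000 in
lemma body_eq_catStep (acc : List String) (i : Int) :
    getCategoriesNamesBody acc i = acc ++ catStep i := by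
  unfold getCategoriesNamesBody catStep
  split_ifs <;> first | rfl | omega

lemma catStep_big {i : Int} (h : 110 < i) : catStep i = ["fizyka"] := by
  unfold catStep
  split_ifs <;> first | rfl | omega

-- the per-step fact for the first 110 indices, checked by evaluation
lemma catBase_take_succ :
    ((List.range 110).all
      (fun n => catBase.take (n + 1) == catBase.take n ++ catStep ((n : Int) + 1))) = true := by
  decide

-- the common shape both ports compute: catBase padded with "fizyka" and truncated to n
def altOf (n : Nat) : List String :=
  if n ≤ 110 then catBase.take n
  else catBase ++ List.replicate (n - 110) "fizyka"

lemma flatMap_catStep (n : Nat) :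
    (List.range n).flatMap (fun (k : Nat) => catStep ((k : Int) + 1)) = altOf n := by
  induction n with
  | zero => simp [altOf]
  | succ n ih =>
    rw [List.range_succ, List.flatMap_append, ih]
    simp only [List.flatMap_cons, List.flatMap_nil, List.append_nil]
    by_cases hn : n < 110
    · have hstep := catBase_take_succ
      rw [List.all_eq_true] at hstep
      have hstep' : catBase.take (n + 1) = catBase.take n ++ catStep ((n : Int) + 1) := by
        have := hstep n (by simpa using hn)
        simpa using this
      simp only [altOf, if_pos (by omega : n ≤ 110), if_pos (by omega : n + 1 ≤ 110)]
      simp [hstep']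
    · have h110 : 110 ≤ n := by omega
      have hbig : catStep ((n : Int) + 1) = ["fizyka"] := by
        apply catStep_big
        exact_mod_cast by omega
      simp only [altOf]
      by_cases he : n = 110
      · subst he
        simp [show catStep 111 = ["fizyka"] from catStep_big (by norm_num),
          List.take_of_length_le (le_of_eq catBase_length)]
      · rw [if_neg (by omega), if_neg (by omega), hbig]
        have hrep : n + 1 - 110 = (n - 110) + 1 := by omega
        rw [hrep, List.replicate_succ']
        simp

-- A's whole loop, through the shared step function and the range lemma
lemma getCategoriesNames_eq_altOf (pdfs : Int) :
    getCategoriesNames pdfs = altOf (pdfs - 1).toNat := by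
  unfold getCategoriesNames
  have hfun : getCategoriesNamesBody = fun acc i => acc ++ catStep i :=
    funext fun acc => funext fun i => body_eq_catStep acc i
  rw [PySem.List.pyRange_one, hfun, PySem.List.foldl_append_eq_flatMap, List.flatMap_map]
  rw [show (fun (a : Nat) => catStep (1 + (a : Int))) = fun (a : Nat) => catStep ((a : Int) + 1)
      from funext fun a => by rw [Int.add_comm]]
  rw [flatMap_catStep, List.nil_append]

-- B's port also computes altOf
lemma getCategoriesNames_alt_eq_altOf (pdfs : Int) :
    getCategoriesNames_alt pdfs = altOf (pdfs - 1).toNat := by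
  show (if max 0 (pdfs - 1) > 110
        then catBase ++ List.replicate (max 0 (pdfs - 1) - 110).toNat "fizyka"
        else catBase).take (max 0 (pdfs - 1)).toNat = altOf (pdfs - 1).toNat
  unfold altOf
  have hmax : (max 0 (pdfs - 1)).toNat = (pdfs - 1).toNat := by omega
  by_cases h : max 0 (pdfs - 1) > 110
  · rw [if_pos h, if_neg (by omega : ¬ (pdfs - 1).toNat ≤ 110)]
    have hlen : (catBase ++ List.replicate (max 0 (pdfs - 1) - 110).toNat "fizyka").length
        = (max 0 (pdfs - 1)).toNat := by
      simp [catBase_length]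
      omega
    rw [List.take_of_length_le (le_of_eq hlen)]
    congr 1
    congr 1
    omega
  · rw [if_neg h, if_pos (by omega : (pdfs - 1).toNat ≤ 110), hmax]

-- ===== VERDICT (by name: the statement is the Claim_ definition above) =====
theorem getCategoriesNames_spec : Claim_equal_getCategoriesNames := by
  intro pdfs _
  unfold Spec_getCategoriesNames
  rw [getCategoriesNames_eq_altOf, getCategoriesNames_alt_eq_altOf]
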